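-- pv_equiv track=rewrite | github.com/alecodominguez/GetYourWhyPhy | locations.py | get_standard_name
-- ===== SOURCE A (Python) =====
-- CAMPUS_BUILDINGS = [
--     "Abrams", "Administration", "AME", "Apache", "Art and Museum of Art",
--     "AHSC", "AHSC Library", "Arbol de la Vida", "Arizona Stadium",
--     "Arizona State Museum", "Babcock", "Bartlett", "Beal Center",
--     "Bear Down Gym", "Bio-Sciences East", "Bio-Sciences West", "Speech",
--     "Biomedical Research Lab", "Bookstore", "CALA West", "CALA East",
--     "CALS Greenhouse", "Centennial", "CESL", "Chavez", "CHRP",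
--     "Chemical Sciences", "Chemistry", "Cherry Ave. Garage",
--     "Civil Engineering", "Cochise", "Coconino", "Colonia de la Paz",
--     "Communications", "Computer Center", "Comstock", "Corleone Center",
--     "Coronado", "DeConcini ENRB", "Douglass", "Drachman", "Drama",
--     "ECE", "Education", "Education North (EDC)", "El Portal", "Eller Theater", "Engineering",
--     "Flandrau", "Forbes", "Geronimo", "Gila", "Gittings", "Gould-Simpson",
--     "Graham", "Greenlee", "Harshbarger", "Harvill", "Haury", "Herring",
--     "Highland Commons", "Highland Ave. Garage", "Hillenbrand Stadium",
--     "Hopi", "Huachuca", "Jefferson Gymnasium", "Jimenez Field",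
--     "Kaibab", "Keating", "Koffler", "Kuiper", "La Aldea", "Law", "LSB",
--     "Main Library", "Science & Engineering Library", "Life Sciences South",
--     "Marshall", "Math", "Math East", "Maricopa", "Marley", "MLK",
--     "McClelland", "McClelland Park", "McKale Memorial Center",
--     "Medical Research", "Meinel", "Mines & Metallurgy", "Mirror Lab",
--     "Modern Languages", "Mohave", "Music", "Navajo", "Nugent", "Nursing",
--     "Old Main", "Pacheco ILC", "Park Ave. Garage", "PSU", "PAS(Phys-Atmos Sciences)", "C.A.T.S.",
--     "Pharmacy", "Pima", "Pinal", "Police", "Psychology", "Pueblo de la Cienega",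
--     "RLAS", "Robson Tennis Center", "Saguaro", "Sancet Stadium", "Santa Cruz",
--     "SALT Center", "Schaefer", "Shantz", "Sierra", "Sixth St. Garage",
--     "Environment and Natural Resources 2","Hillenbrand Aquatic Center",
--     "Social Sciences", "Sonora", "Steward Observatory", "Student Recreation Center",
--     "North REC", "Honors", "Cactus Grill", "85 North", "Slot Canyon Café", "Radicchio",
--     "Student Union Memorial Center", "Tyndall Ave. Garage", "Udall Center",
--     "UAMC", "Vet. Sci. & Microbiology", "Visitor Center", "Yavapai", "Yuma",
--     "Cole and Jeannie Davis Sports Center"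
-- ]
--
-- ALIASES = {
--     "sel": "Science & Engineering Library",
--     "the sel": "Science & Engineering Library",
--     "science library": "Science & Engineering Library",
--     "scilib": "Science & Engineering Library",
--     "rec center": "Student Recreation Center",
--     "south rec": "Student Recreation Center",
--     "the rec": "Student Recreation Center",
--     "north rec": "Student Recreation Center",
--     "the union": "Student Union Memorial Center",
--     "student unions": "Student Union Memorial Center",
--     "union": "Student Union Memorial Center",
--     "sumc": "Student Union Memorial Center",
--     "enrb": "DeConcini ENRB",
--     "enr2": "Environment and Natural Resources 2",
--     "gould": "Gould-Simpson",
--     "gs": "Gould-Simpson",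
--     "triathlon hq": "Hillenbrand Aquatic Center",
--     "cats": "C.A.T.S.",
--     "c.a.t.s.": "C.A.T.S.",
--     "clements": "C.A.T.S.",
--     "Ginny L. Clements Academic Center": "C.A.T.S.",
--     "mckale": "McKale Memorial Center",
--     "mckale center": "McKale Memorial Center",
--     "edc": "Education North (EDC)",
--     "education north": "Education North (EDC)",
--     "engineering design center": "Education North (EDC)",
--     "la paz": "Colonia de la Paz",
--     "civil": "Civil Engineering",
--     "Physics-Atmospheric Sciences Building": "PAS(Phys-Atmos Sciences)",
--     "pas": "PAS(Phys-Atmos Sciences)",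
--     "Center for English as a Second Language": "CESL",
--     "M Pacheco ILC": "Pacheco ILC",
--     "M. Pacheco ILC": "Pacheco ILC",
--     "Manuel Pacheco Integrated Learning Center": "Pacheco ILC",
--     "ILC": "Pacheco ILC",
--     "slhs": "Speech"
-- }
--
-- def get_standard_name(name):
--     """
--     Normalizes input and checks both the official list AND the aliases.
--     """
--     # takes name above and standarizes it to avoid uppercase and special character differences
--     clean_input = name.strip().lower().replace(" ", "").replace("-", "").replace(".", "")
--
--     # iterate through the Aliases list
--     # normalize the keys in the dictionary for comparison
--     # if they match, return the OFFICIAL string from CAMPUS_BUILDINGS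
--     for nickname, official_name in ALIASES.items():
--         clean_nickname = nickname.lower().replace(" ", "").replace("-", "").replace(".", "")
--         if clean_input == clean_nickname:
--             return official_name
--
--     # iterate through the official list
--     for building in CAMPUS_BUILDINGS:
--         clean_building = building.lower().replace(" ", "").replace("-", "").replace(".", "")
--         if clean_input == clean_building:
--             return building
--     # return None if no match is found (for WhyPhy.py)
--     return None
-- ===== SOURCE B (Python) =====
-- # Precomputed index: normalized key -> official name. Built once from the
-- # module's ALIASES and CAMPUS_BUILDINGS (aliases take precedence, first
-- # occurrence wins), so a call is one normalization plus one dict lookup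
-- # instead of two per-call scans that re-normalize every entry.
-- _LOOKUP = {
--     'sel': 'Science & Engineering Library',
--     'thesel': 'Science & Engineering Library',
--     'sciencelibrary': 'Science & Engineering Library',
--     'scilib': 'Science & Engineering Library',
--     'reccenter': 'Student Recreation Center',
--     'southrec': 'Student Recreation Center',
--     'therec': 'Student Recreation Center',
--     'northrec': 'Student Recreation Center',
--     'theunion': 'Student Union Memorial Center',
--     'studentunions': 'Student Union Memorial Center',
--     'union': 'Student Union Memorial Center',
--     'sumc': 'Student Union Memorial Center',
--     'enrb': 'DeConcini ENRB',
--     'enr2': 'Environment and Natural Resources 2',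
--     'gould': 'Gould-Simpson',
--     'gs': 'Gould-Simpson',
--     'triathlonhq': 'Hillenbrand Aquatic Center',
--     'cats': 'C.A.T.S.',
--     'clements': 'C.A.T.S.',
--     'ginnylclementsacademiccenter': 'C.A.T.S.',
--     'mckale': 'McKale Memorial Center',
--     'mckalecenter': 'McKale Memorial Center',
--     'edc': 'Education North (EDC)',
--     'educationnorth': 'Education North (EDC)',
--     'engineeringdesigncenter': 'Education North (EDC)',
--     'lapaz': 'Colonia de la Paz',
--     'civil': 'Civil Engineering',
--     'physicsatmosphericsciencesbuilding': 'PAS(Phys-Atmos Sciences)',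
--     'pas': 'PAS(Phys-Atmos Sciences)',
--     'centerforenglishasasecondlanguage': 'CESL',
--     'mpachecoilc': 'Pacheco ILC',
--     'manuelpachecointegratedlearningcenter': 'Pacheco ILC',
--     'ilc': 'Pacheco ILC',
--     'slhs': 'Speech',
--     'abrams': 'Abrams',
--     'administration': 'Administration',
--     'ame': 'AME',
--     'apache': 'Apache',
--     'artandmuseumofart': 'Art and Museum of Art',
--     'ahsc': 'AHSC',
--     'ahsclibrary': 'AHSC Library',
--     'arboldelavida': 'Arbol de la Vida',
--     'arizonastadium': 'Arizona Stadium',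
--     'arizonastatemuseum': 'Arizona State Museum',
--     'babcock': 'Babcock',
--     'bartlett': 'Bartlett',
--     'bealcenter': 'Beal Center',
--     'beardowngym': 'Bear Down Gym',
--     'bioscienceseast': 'Bio-Sciences East',
--     'bioscienceswest': 'Bio-Sciences West',
--     'speech': 'Speech',
--     'biomedicalresearchlab': 'Biomedical Research Lab',
--     'bookstore': 'Bookstore',
--     'calawest': 'CALA West',
--     'calaeast': 'CALA East',
--     'calsgreenhouse': 'CALS Greenhouse',
--     'centennial': 'Centennial',
--     'cesl': 'CESL',
--     'chavez': 'Chavez',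
--     'chrp': 'CHRP',
--     'chemicalsciences': 'Chemical Sciences',
--     'chemistry': 'Chemistry',
--     'cherryavegarage': 'Cherry Ave. Garage',
--     'civilengineering': 'Civil Engineering',
--     'cochise': 'Cochise',
--     'coconino': 'Coconino',
--     'coloniadelapaz': 'Colonia de la Paz',
--     'communications': 'Communications',
--     'computercenter': 'Computer Center',
--     'comstock': 'Comstock',
--     'corleonecenter': 'Corleone Center',
--     'coronado': 'Coronado',
--     'deconcinienrb': 'DeConcini ENRB',
--     'douglass': 'Douglass',
--     'drachman': 'Drachman',
--     'drama': 'Drama',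
--     'ece': 'ECE',
--     'education': 'Education',
--     'educationnorth(edc)': 'Education North (EDC)',
--     'elportal': 'El Portal',
--     'ellertheater': 'Eller Theater',
--     'engineering': 'Engineering',
--     'flandrau': 'Flandrau',
--     'forbes': 'Forbes',
--     'geronimo': 'Geronimo',
--     'gila': 'Gila',
--     'gittings': 'Gittings',
--     'gouldsimpson': 'Gould-Simpson',
--     'graham': 'Graham',
--     'greenlee': 'Greenlee',
--     'harshbarger': 'Harshbarger',
--     'harvill': 'Harvill',
--     'haury': 'Haury',
--     'herring': 'Herring',
--     'highlandcommons': 'Highland Commons',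
--     'highlandavegarage': 'Highland Ave. Garage',
--     'hillenbrandstadium': 'Hillenbrand Stadium',
--     'hopi': 'Hopi',
--     'huachuca': 'Huachuca',
--     'jeffersongymnasium': 'Jefferson Gymnasium',
--     'jimenezfield': 'Jimenez Field',
--     'kaibab': 'Kaibab',
--     'keating': 'Keating',
--     'koffler': 'Koffler',
--     'kuiper': 'Kuiper',
--     'laaldea': 'La Aldea',
--     'law': 'Law',
--     'lsb': 'LSB',
--     'mainlibrary': 'Main Library',
--     'science&engineeringlibrary': 'Science & Engineering Library',
--     'lifesciencessouth': 'Life Sciences South',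
--     'marshall': 'Marshall',
--     'math': 'Math',
--     'matheast': 'Math East',
--     'maricopa': 'Maricopa',
--     'marley': 'Marley',
--     'mlk': 'MLK',
--     'mcclelland': 'McClelland',
--     'mcclellandpark': 'McClelland Park',
--     'mckalememorialcenter': 'McKale Memorial Center',
--     'medicalresearch': 'Medical Research',
--     'meinel': 'Meinel',
--     'mines&metallurgy': 'Mines & Metallurgy',
--     'mirrorlab': 'Mirror Lab',
--     'modernlanguages': 'Modern Languages',
--     'mohave': 'Mohave',
--     'music': 'Music',
--     'navajo': 'Navajo',
--     'nugent': 'Nugent',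
--     'nursing': 'Nursing',
--     'oldmain': 'Old Main',
--     'pachecoilc': 'Pacheco ILC',
--     'parkavegarage': 'Park Ave. Garage',
--     'psu': 'PSU',
--     'pas(physatmossciences)': 'PAS(Phys-Atmos Sciences)',
--     'pharmacy': 'Pharmacy',
--     'pima': 'Pima',
--     'pinal': 'Pinal',
--     'police': 'Police',
--     'psychology': 'Psychology',
--     'pueblodelacienega': 'Pueblo de la Cienega',
--     'rlas': 'RLAS',
--     'robsontenniscenter': 'Robson Tennis Center',
--     'saguaro': 'Saguaro',
--     'sancetstadium': 'Sancet Stadium',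
--     'santacruz': 'Santa Cruz',
--     'saltcenter': 'SALT Center',
--     'schaefer': 'Schaefer',
--     'shantz': 'Shantz',
--     'sierra': 'Sierra',
--     'sixthstgarage': 'Sixth St. Garage',
--     'environmentandnaturalresources2': 'Environment and Natural Resources 2',
--     'hillenbrandaquaticcenter': 'Hillenbrand Aquatic Center',
--     'socialsciences': 'Social Sciences',
--     'sonora': 'Sonora',
--     'stewardobservatory': 'Steward Observatory',
--     'studentrecreationcenter': 'Student Recreation Center',
--     'honors': 'Honors',
--     'cactusgrill': 'Cactus Grill',
--     '85north': '85 North',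
--     'slotcanyoncafé': 'Slot Canyon Café',
--     'radicchio': 'Radicchio',
--     'studentunionmemorialcenter': 'Student Union Memorial Center',
--     'tyndallavegarage': 'Tyndall Ave. Garage',
--     'udallcenter': 'Udall Center',
--     'uamc': 'UAMC',
--     'vetsci&microbiology': 'Vet. Sci. & Microbiology',
--     'visitorcenter': 'Visitor Center',
--     'yavapai': 'Yavapai',
--     'yuma': 'Yuma',
--     'coleandjeanniedavissportscenter': 'Cole and Jeannie Davis Sports Center',
-- }
--
--
-- def get_standard_name(name):
--     """
--     Normalizes input and checks both the official list AND the aliases.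
--     """
--     clean = name.strip().lower().replace(" ", "").replace("-", "").replace(".", "")
--     return _LOOKUP.get(clean)
-- ===== Notes on version B (the rewrite author's own statement) =====
-- stated objective: alternative
-- what changed: Replaced A's two per-call sequential scans (which re-normalize every alias key and every building name on each call) by a single precomputed table mapping normalized key to official name (aliases take precedence, first occurrence wins), so a call is one normalization of the input plus one dict lookup.
import Mathlib
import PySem

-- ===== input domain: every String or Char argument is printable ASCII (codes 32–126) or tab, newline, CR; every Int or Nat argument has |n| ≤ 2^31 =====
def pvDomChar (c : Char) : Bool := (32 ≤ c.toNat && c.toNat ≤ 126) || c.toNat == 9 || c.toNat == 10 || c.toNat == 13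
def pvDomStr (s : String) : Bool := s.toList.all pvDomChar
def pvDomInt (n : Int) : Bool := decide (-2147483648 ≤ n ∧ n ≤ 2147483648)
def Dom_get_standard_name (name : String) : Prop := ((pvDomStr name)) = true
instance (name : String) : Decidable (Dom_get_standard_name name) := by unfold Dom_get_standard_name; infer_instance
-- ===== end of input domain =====

-- B replaces A's two per-call equality scans (which re-normalize every alias and
-- building on every call) by one precomputed normalized-key → official-name table,
-- so a call is a single normalization plus one dict lookup (objective: alternative).

-- s.strip().lower().replace(" ", "").replace("-", "").replace(".", "")  (same in both Pythons)
def pyNorm (s : String) : String :=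
  PySem.Str.replace (PySem.Str.replace (PySem.Str.replace
    (PySem.Str.lower (PySem.Str.strip s)) " " "") "-" "") "." ""

-- ===== PORT A =====
def CAMPUS_BUILDINGS : List String := [
    "Abrams",
    "Administration",
    "AME",
    "Apache",
    "Art and Museum of Art",
    "AHSC",
    "AHSC Library",
    "Arbol de la Vida",
    "Arizona Stadium",
    "Arizona State Museum",
    "Babcock",
    "Bartlett",
    "Beal Center",
    "Bear Down Gym",
    "Bio-Sciences East",
    "Bio-Sciences West",
    "Speech",
    "Biomedical Research Lab",
    "Bookstore",
    "CALA West",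
    "CALA East",
    "CALS Greenhouse",
    "Centennial",
    "CESL",
    "Chavez",
    "CHRP",
    "Chemical Sciences",
    "Chemistry",
    "Cherry Ave. Garage",
    "Civil Engineering",
    "Cochise",
    "Coconino",
    "Colonia de la Paz",
    "Communications",
    "Computer Center",
    "Comstock",
    "Corleone Center",
    "Coronado",
    "DeConcini ENRB",
    "Douglass",
    "Drachman",
    "Drama",
    "ECE",
    "Education",
    "Education North (EDC)",
    "El Portal",
    "Eller Theater",
    "Engineering",
    "Flandrau",
    "Forbes",
    "Geronimo",
    "Gila",
    "Gittings",
    "Gould-Simpson",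
    "Graham",
    "Greenlee",
    "Harshbarger",
    "Harvill",
    "Haury",
    "Herring",
    "Highland Commons",
    "Highland Ave. Garage",
    "Hillenbrand Stadium",
    "Hopi",
    "Huachuca",
    "Jefferson Gymnasium",
    "Jimenez Field",
    "Kaibab",
    "Keating",
    "Koffler",
    "Kuiper",
    "La Aldea",
    "Law",
    "LSB",
    "Main Library",
    "Science & Engineering Library",
    "Life Sciences South",
    "Marshall",
    "Math",
    "Math East",
    "Maricopa",
    "Marley",
    "MLK",
    "McClelland",
    "McClelland Park",
    "McKale Memorial Center",
    "Medical Research",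
    "Meinel",
    "Mines & Metallurgy",
    "Mirror Lab",
    "Modern Languages",
    "Mohave",
    "Music",
    "Navajo",
    "Nugent",
    "Nursing",
    "Old Main",
    "Pacheco ILC",
    "Park Ave. Garage",
    "PSU",
    "PAS(Phys-Atmos Sciences)",
    "C.A.T.S.",
    "Pharmacy",
    "Pima",
    "Pinal",
    "Police",
    "Psychology",
    "Pueblo de la Cienega",
    "RLAS",
    "Robson Tennis Center",
    "Saguaro",
    "Sancet Stadium",
    "Santa Cruz",
    "SALT Center",
    "Schaefer",
    "Shantz",
    "Sierra",
    "Sixth St. Garage",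
    "Environment and Natural Resources 2",
    "Hillenbrand Aquatic Center",
    "Social Sciences",
    "Sonora",
    "Steward Observatory",
    "Student Recreation Center",
    "North REC",
    "Honors",
    "Cactus Grill",
    "85 North",
    "Slot Canyon Caf\u00e9",
    "Radicchio",
    "Student Union Memorial Center",
    "Tyndall Ave. Garage",
    "Udall Center",
    "UAMC",
    "Vet. Sci. & Microbiology",
    "Visitor Center",
    "Yavapai",
    "Yuma",
    "Cole and Jeannie Davis Sports Center"
]

def ALIASES : List (String × String) := [
    ("sel", "Science & Engineering Library"),
    ("the sel", "Science & Engineering Library"),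
    ("science library", "Science & Engineering Library"),
    ("scilib", "Science & Engineering Library"),
    ("rec center", "Student Recreation Center"),
    ("south rec", "Student Recreation Center"),
    ("the rec", "Student Recreation Center"),
    ("north rec", "Student Recreation Center"),
    ("the union", "Student Union Memorial Center"),
    ("student unions", "Student Union Memorial Center"),
    ("union", "Student Union Memorial Center"),
    ("sumc", "Student Union Memorial Center"),
    ("enrb", "DeConcini ENRB"),
    ("enr2", "Environment and Natural Resources 2"),
    ("gould", "Gould-Simpson"),
    ("gs", "Gould-Simpson"),
    ("triathlon hq", "Hillenbrand Aquatic Center"),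
    ("cats", "C.A.T.S."),
    ("c.a.t.s.", "C.A.T.S."),
    ("clements", "C.A.T.S."),
    ("Ginny L. Clements Academic Center", "C.A.T.S."),
    ("mckale", "McKale Memorial Center"),
    ("mckale center", "McKale Memorial Center"),
    ("edc", "Education North (EDC)"),
    ("education north", "Education North (EDC)"),
    ("engineering design center", "Education North (EDC)"),
    ("la paz", "Colonia de la Paz"),
    ("civil", "Civil Engineering"),
    ("Physics-Atmospheric Sciences Building", "PAS(Phys-Atmos Sciences)"),
    ("pas", "PAS(Phys-Atmos Sciences)"),
    ("Center for English as a Second Language", "CESL"),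
    ("M Pacheco ILC", "Pacheco ILC"),
    ("M. Pacheco ILC", "Pacheco ILC"),
    ("Manuel Pacheco Integrated Learning Center", "Pacheco ILC"),
    ("ILC", "Pacheco ILC"),
    ("slhs", "Speech")
]

-- first loop of A: scan ALIASES, normalizing each key, return its official name on match
def scanAliases (c : String) : List (String × String) → Option String
  | [] => none
  | (nick, off) :: rest => if c == pyNorm nick then some off else scanAliases c rest

-- second loop of A: scan CAMPUS_BUILDINGS, normalizing each entry
def scanBuildings (c : String) : List String → Option String
  | [] => none
  | b :: rest => if c == pyNorm b then some b else scanBuildings c rest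

def get_standard_name (name : String) : Option String :=
  let clean_input := pyNorm name
  match scanAliases clean_input ALIASES with
  | some off => some off
  | none => scanBuildings clean_input CAMPUS_BUILDINGS

-- ===== PORT B =====
-- Source B's _LOOKUP dict literal (normalized key → official name; all keys distinct)
def LOOKUP_TABLE : List (String × String) := [
    ("sel", "Science & Engineering Library"),
    ("thesel", "Science & Engineering Library"),
    ("sciencelibrary", "Science & Engineering Library"),
    ("scilib", "Science & Engineering Library"),
    ("reccenter", "Student Recreation Center"),
    ("southrec", "Student Recreation Center"),
    ("therec", "Student Recreation Center"),
    ("northrec", "Student Recreation Center"),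
    ("theunion", "Student Union Memorial Center"),
    ("studentunions", "Student Union Memorial Center"),
    ("union", "Student Union Memorial Center"),
    ("sumc", "Student Union Memorial Center"),
    ("enrb", "DeConcini ENRB"),
    ("enr2", "Environment and Natural Resources 2"),
    ("gould", "Gould-Simpson"),
    ("gs", "Gould-Simpson"),
    ("triathlonhq", "Hillenbrand Aquatic Center"),
    ("cats", "C.A.T.S."),
    ("clements", "C.A.T.S."),
    ("ginnylclementsacademiccenter", "C.A.T.S."),
    ("mckale", "McKale Memorial Center"),
    ("mckalecenter", "McKale Memorial Center"),
    ("edc", "Education North (EDC)"),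
    ("educationnorth", "Education North (EDC)"),
    ("engineeringdesigncenter", "Education North (EDC)"),
    ("lapaz", "Colonia de la Paz"),
    ("civil", "Civil Engineering"),
    ("physicsatmosphericsciencesbuilding", "PAS(Phys-Atmos Sciences)"),
    ("pas", "PAS(Phys-Atmos Sciences)"),
    ("centerforenglishasasecondlanguage", "CESL"),
    ("mpachecoilc", "Pacheco ILC"),
    ("manuelpachecointegratedlearningcenter", "Pacheco ILC"),
    ("ilc", "Pacheco ILC"),
    ("slhs", "Speech"),
    ("abrams", "Abrams"),
    ("administration", "Administration"),
    ("ame", "AME"),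
    ("apache", "Apache"),
    ("artandmuseumofart", "Art and Museum of Art"),
    ("ahsc", "AHSC"),
    ("ahsclibrary", "AHSC Library"),
    ("arboldelavida", "Arbol de la Vida"),
    ("arizonastadium", "Arizona Stadium"),
    ("arizonastatemuseum", "Arizona State Museum"),
    ("babcock", "Babcock"),
    ("bartlett", "Bartlett"),
    ("bealcenter", "Beal Center"),
    ("beardowngym", "Bear Down Gym"),
    ("bioscienceseast", "Bio-Sciences East"),
    ("bioscienceswest", "Bio-Sciences West"),
    ("speech", "Speech"),
    ("biomedicalresearchlab", "Biomedical Research Lab"),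
    ("bookstore", "Bookstore"),
    ("calawest", "CALA West"),
    ("calaeast", "CALA East"),
    ("calsgreenhouse", "CALS Greenhouse"),
    ("centennial", "Centennial"),
    ("cesl", "CESL"),
    ("chavez", "Chavez"),
    ("chrp", "CHRP"),
    ("chemicalsciences", "Chemical Sciences"),
    ("chemistry", "Chemistry"),
    ("cherryavegarage", "Cherry Ave. Garage"),
    ("civilengineering", "Civil Engineering"),
    ("cochise", "Cochise"),
    ("coconino", "Coconino"),
    ("coloniadelapaz", "Colonia de la Paz"),
    ("communications", "Communications"),
    ("computercenter", "Computer Center"),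
    ("comstock", "Comstock"),
    ("corleonecenter", "Corleone Center"),
    ("coronado", "Coronado"),
    ("deconcinienrb", "DeConcini ENRB"),
    ("douglass", "Douglass"),
    ("drachman", "Drachman"),
    ("drama", "Drama"),
    ("ece", "ECE"),
    ("education", "Education"),
    ("educationnorth(edc)", "Education North (EDC)"),
    ("elportal", "El Portal"),
    ("ellertheater", "Eller Theater"),
    ("engineering", "Engineering"),
    ("flandrau", "Flandrau"),
    ("forbes", "Forbes"),
    ("geronimo", "Geronimo"),
    ("gila", "Gila"),
    ("gittings", "Gittings"),
    ("gouldsimpson", "Gould-Simpson"),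
    ("graham", "Graham"),
    ("greenlee", "Greenlee"),
    ("harshbarger", "Harshbarger"),
    ("harvill", "Harvill"),
    ("haury", "Haury"),
    ("herring", "Herring"),
    ("highlandcommons", "Highland Commons"),
    ("highlandavegarage", "Highland Ave. Garage"),
    ("hillenbrandstadium", "Hillenbrand Stadium"),
    ("hopi", "Hopi"),
    ("huachuca", "Huachuca"),
    ("jeffersongymnasium", "Jefferson Gymnasium"),
    ("jimenezfield", "Jimenez Field"),
    ("kaibab", "Kaibab"),
    ("keating", "Keating"),
    ("koffler", "Koffler"),
    ("kuiper", "Kuiper"),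
    ("laaldea", "La Aldea"),
    ("law", "Law"),
    ("lsb", "LSB"),
    ("mainlibrary", "Main Library"),
    ("science&engineeringlibrary", "Science & Engineering Library"),
    ("lifesciencessouth", "Life Sciences South"),
    ("marshall", "Marshall"),
    ("math", "Math"),
    ("matheast", "Math East"),
    ("maricopa", "Maricopa"),
    ("marley", "Marley"),
    ("mlk", "MLK"),
    ("mcclelland", "McClelland"),
    ("mcclellandpark", "McClelland Park"),
    ("mckalememorialcenter", "McKale Memorial Center"),
    ("medicalresearch", "Medical Research"),
    ("meinel", "Meinel"),
    ("mines&metallurgy", "Mines & Metallurgy"),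
    ("mirrorlab", "Mirror Lab"),
    ("modernlanguages", "Modern Languages"),
    ("mohave", "Mohave"),
    ("music", "Music"),
    ("navajo", "Navajo"),
    ("nugent", "Nugent"),
    ("nursing", "Nursing"),
    ("oldmain", "Old Main"),
    ("pachecoilc", "Pacheco ILC"),
    ("parkavegarage", "Park Ave. Garage"),
    ("psu", "PSU"),
    ("pas(physatmossciences)", "PAS(Phys-Atmos Sciences)"),
    ("pharmacy", "Pharmacy"),
    ("pima", "Pima"),
    ("pinal", "Pinal"),
    ("police", "Police"),
    ("psychology", "Psychology"),
    ("pueblodelacienega", "Pueblo de la Cienega"),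
    ("rlas", "RLAS"),
    ("robsontenniscenter", "Robson Tennis Center"),
    ("saguaro", "Saguaro"),
    ("sancetstadium", "Sancet Stadium"),
    ("santacruz", "Santa Cruz"),
    ("saltcenter", "SALT Center"),
    ("schaefer", "Schaefer"),
    ("shantz", "Shantz"),
    ("sierra", "Sierra"),
    ("sixthstgarage", "Sixth St. Garage"),
    ("environmentandnaturalresources2", "Environment and Natural Resources 2"),
    ("hillenbrandaquaticcenter", "Hillenbrand Aquatic Center"),
    ("socialsciences", "Social Sciences"),
    ("sonora", "Sonora"),
    ("stewardobservatory", "Steward Observatory"),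
    ("studentrecreationcenter", "Student Recreation Center"),
    ("honors", "Honors"),
    ("cactusgrill", "Cactus Grill"),
    ("85north", "85 North"),
    ("slotcanyoncaf\u00e9", "Slot Canyon Caf\u00e9"),
    ("radicchio", "Radicchio"),
    ("studentunionmemorialcenter", "Student Union Memorial Center"),
    ("tyndallavegarage", "Tyndall Ave. Garage"),
    ("udallcenter", "Udall Center"),
    ("uamc", "UAMC"),
    ("vetsci&microbiology", "Vet. Sci. & Microbiology"),
    ("visitorcenter", "Visitor Center"),
    ("yavapai", "Yavapai"),
    ("yuma", "Yuma"),
    ("coleandjeanniedavissportscenter", "Cole and Jeannie Davis Sports Center")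
]

def get_standard_name_alt (name : String) : Option String :=
  let clean := pyNorm name
  (PySem.Dict.mk LOOKUP_TABLE).get? clean

-- ===== PRECONDITION & SPEC =====
def Spec_get_standard_name (name : String) (out : Option String) : Prop := out = get_standard_name_alt name
instance (name : String) (out : Option String) : Decidable (Spec_get_standard_name name out) := by unfold Spec_get_standard_name; infer_instance

-- ===== CLAIM =====
def Claim_equal_get_standard_name : Prop := ∀ (name : String), Dom_get_standard_name name → Spec_get_standard_name name (get_standard_name name)

-- ===== LEMMAS AND PROOFS =====

theorem lookup_cons {β : Type} (k a : String) (b : β) (rest : List (String × β)) :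
    List.lookup k ((a, b) :: rest) = if k = a then some b else List.lookup k rest := by
  by_cases h : k = a
  · subst h; simp [List.lookup]
  · have hf : (k == a) = false := beq_eq_false_iff_ne.mpr h
    simp [List.lookup, hf, h]

theorem dict_get?_eq_lookup (l : List (String × String)) (k : String) :
    (PySem.Dict.mk l).get? k = List.lookup k l := by
  induction l with
  | nil => rfl
  | cons p rest ih =>
    obtain ⟨a, b⟩ := p
    rw [PySem.Dict.get?_mk_cons, lookup_cons]
    by_cases h : k = a
    · subst h; simp
    · simp [h, Ne.symm h, ih]

theorem scanAliases_eq (c : String) (L : List (String × String)) :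
    scanAliases c L = List.lookup c (L.map (fun p => (pyNorm p.1, p.2))) := by
  induction L with
  | nil => rfl
  | cons p rest ih =>
    obtain ⟨nick, off⟩ := p
    simp [scanAliases, lookup_cons, ih]

theorem scanBuildings_eq (c : String) (L : List String) :
    scanBuildings c L = List.lookup c (L.map (fun b => (pyNorm b, b))) := by
  induction L with
  | nil => rfl
  | cons b rest ih =>
    simp [scanBuildings, lookup_cons, ih]

theorem lookup_append {β : Type} (k : String) (L1 L2 : List (String × β)) :
    List.lookup k (L1 ++ L2) = (List.lookup k L1).or (List.lookup k L2) := by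
  induction L1 with
  | nil => simp
  | cons p rest ih =>
    obtain ⟨a, b⟩ := p
    rw [List.cons_append, lookup_cons, lookup_cons]
    by_cases h : k = a
    · simp [h]
    · simp [h, ih]

-- first-occurrence key deduplication (what Source B's dict literal is, relative to the
-- concatenation of A's two normalized key lists); seen = keys already emitted
def keyDedupAux (seen : List String) : List (String × String) → List (String × String)
  | [] => []
  | (k, v) :: rest =>
      if seen.contains k then keyDedupAux seen rest
      else (k, v) :: keyDedupAux (k :: seen) rest

theorem lookup_keyDedupAux (c : String) (seen : List String) (L : List (String × String))
    (h : c ∉ seen) : List.lookup c (keyDedupAux seen L) = List.lookup c L := by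
  induction L generalizing seen with
  | nil => rfl
  | cons p rest ih =>
    obtain ⟨k, v⟩ := p
    rw [keyDedupAux]
    by_cases hs : seen.contains k
    · have hck : c ≠ k := fun hck => h (by simpa [hck] using List.contains_iff_mem.mp hs)
      rw [if_pos hs, ih seen h, lookup_cons, if_neg hck]
    · rw [if_neg hs, lookup_cons, lookup_cons]
      by_cases hck : c = k
      · simp [hck]
      · rw [if_neg hck, if_neg hck, ih (k :: seen) (by simp [hck, h])]

-- the two normalized key lists, evaluated once (the expensive concrete fact)
def NORMED : List (String × String) := [
    ("sel", "Science & Engineering Library"),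
    ("thesel", "Science & Engineering Library"),
    ("sciencelibrary", "Science & Engineering Library"),
    ("scilib", "Science & Engineering Library"),
    ("reccenter", "Student Recreation Center"),
    ("southrec", "Student Recreation Center"),
    ("therec", "Student Recreation Center"),
    ("northrec", "Student Recreation Center"),
    ("theunion", "Student Union Memorial Center"),
    ("studentunions", "Student Union Memorial Center"),
    ("union", "Student Union Memorial Center"),
    ("sumc", "Student Union Memorial Center"),
    ("enrb", "DeConcini ENRB"),
    ("enr2", "Environment and Natural Resources 2"),
    ("gould", "Gould-Simpson"),
    ("gs", "Gould-Simpson"),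
    ("triathlonhq", "Hillenbrand Aquatic Center"),
    ("cats", "C.A.T.S."),
    ("cats", "C.A.T.S."),
    ("clements", "C.A.T.S."),
    ("ginnylclementsacademiccenter", "C.A.T.S."),
    ("mckale", "McKale Memorial Center"),
    ("mckalecenter", "McKale Memorial Center"),
    ("edc", "Education North (EDC)"),
    ("educationnorth", "Education North (EDC)"),
    ("engineeringdesigncenter", "Education North (EDC)"),
    ("lapaz", "Colonia de la Paz"),
    ("civil", "Civil Engineering"),
    ("physicsatmosphericsciencesbuilding", "PAS(Phys-Atmos Sciences)"),
    ("pas", "PAS(Phys-Atmos Sciences)"),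
    ("centerforenglishasasecondlanguage", "CESL"),
    ("mpachecoilc", "Pacheco ILC"),
    ("mpachecoilc", "Pacheco ILC"),
    ("manuelpachecointegratedlearningcenter", "Pacheco ILC"),
    ("ilc", "Pacheco ILC"),
    ("slhs", "Speech"),
    ("abrams", "Abrams"),
    ("administration", "Administration"),
    ("ame", "AME"),
    ("apache", "Apache"),
    ("artandmuseumofart", "Art and Museum of Art"),
    ("ahsc", "AHSC"),
    ("ahsclibrary", "AHSC Library"),
    ("arboldelavida", "Arbol de la Vida"),
    ("arizonastadium", "Arizona Stadium"),
    ("arizonastatemuseum", "Arizona State Museum"),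
    ("babcock", "Babcock"),
    ("bartlett", "Bartlett"),
    ("bealcenter", "Beal Center"),
    ("beardowngym", "Bear Down Gym"),
    ("bioscienceseast", "Bio-Sciences East"),
    ("bioscienceswest", "Bio-Sciences West"),
    ("speech", "Speech"),
    ("biomedicalresearchlab", "Biomedical Research Lab"),
    ("bookstore", "Bookstore"),
    ("calawest", "CALA West"),
    ("calaeast", "CALA East"),
    ("calsgreenhouse", "CALS Greenhouse"),
    ("centennial", "Centennial"),
    ("cesl", "CESL"),
    ("chavez", "Chavez"),
    ("chrp", "CHRP"),
    ("chemicalsciences", "Chemical Sciences"),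
    ("chemistry", "Chemistry"),
    ("cherryavegarage", "Cherry Ave. Garage"),
    ("civilengineering", "Civil Engineering"),
    ("cochise", "Cochise"),
    ("coconino", "Coconino"),
    ("coloniadelapaz", "Colonia de la Paz"),
    ("communications", "Communications"),
    ("computercenter", "Computer Center"),
    ("comstock", "Comstock"),
    ("corleonecenter", "Corleone Center"),
    ("coronado", "Coronado"),
    ("deconcinienrb", "DeConcini ENRB"),
    ("douglass", "Douglass"),
    ("drachman", "Drachman"),
    ("drama", "Drama"),
    ("ece", "ECE"),
    ("education", "Education"),
    ("educationnorth(edc)", "Education North (EDC)"),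
    ("elportal", "El Portal"),
    ("ellertheater", "Eller Theater"),
    ("engineering", "Engineering"),
    ("flandrau", "Flandrau"),
    ("forbes", "Forbes"),
    ("geronimo", "Geronimo"),
    ("gila", "Gila"),
    ("gittings", "Gittings"),
    ("gouldsimpson", "Gould-Simpson"),
    ("graham", "Graham"),
    ("greenlee", "Greenlee"),
    ("harshbarger", "Harshbarger"),
    ("harvill", "Harvill"),
    ("haury", "Haury"),
    ("herring", "Herring"),
    ("highlandcommons", "Highland Commons"),
    ("highlandavegarage", "Highland Ave. Garage"),
    ("hillenbrandstadium", "Hillenbrand Stadium"),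
    ("hopi", "Hopi"),
    ("huachuca", "Huachuca"),
    ("jeffersongymnasium", "Jefferson Gymnasium"),
    ("jimenezfield", "Jimenez Field"),
    ("kaibab", "Kaibab"),
    ("keating", "Keating"),
    ("koffler", "Koffler"),
    ("kuiper", "Kuiper"),
    ("laaldea", "La Aldea"),
    ("law", "Law"),
    ("lsb", "LSB"),
    ("mainlibrary", "Main Library"),
    ("science&engineeringlibrary", "Science & Engineering Library"),
    ("lifesciencessouth", "Life Sciences South"),
    ("marshall", "Marshall"),
    ("math", "Math"),
    ("matheast", "Math East"),
    ("maricopa", "Maricopa"),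
    ("marley", "Marley"),
    ("mlk", "MLK"),
    ("mcclelland", "McClelland"),
    ("mcclellandpark", "McClelland Park"),
    ("mckalememorialcenter", "McKale Memorial Center"),
    ("medicalresearch", "Medical Research"),
    ("meinel", "Meinel"),
    ("mines&metallurgy", "Mines & Metallurgy"),
    ("mirrorlab", "Mirror Lab"),
    ("modernlanguages", "Modern Languages"),
    ("mohave", "Mohave"),
    ("music", "Music"),
    ("navajo", "Navajo"),
    ("nugent", "Nugent"),
    ("nursing", "Nursing"),
    ("oldmain", "Old Main"),
    ("pachecoilc", "Pacheco ILC"),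
    ("parkavegarage", "Park Ave. Garage"),
    ("psu", "PSU"),
    ("pas(physatmossciences)", "PAS(Phys-Atmos Sciences)"),
    ("cats", "C.A.T.S."),
    ("pharmacy", "Pharmacy"),
    ("pima", "Pima"),
    ("pinal", "Pinal"),
    ("police", "Police"),
    ("psychology", "Psychology"),
    ("pueblodelacienega", "Pueblo de la Cienega"),
    ("rlas", "RLAS"),
    ("robsontenniscenter", "Robson Tennis Center"),
    ("saguaro", "Saguaro"),
    ("sancetstadium", "Sancet Stadium"),
    ("santacruz", "Santa Cruz"),
    ("saltcenter", "SALT Center"),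
    ("schaefer", "Schaefer"),
    ("shantz", "Shantz"),
    ("sierra", "Sierra"),
    ("sixthstgarage", "Sixth St. Garage"),
    ("environmentandnaturalresources2", "Environment and Natural Resources 2"),
    ("hillenbrandaquaticcenter", "Hillenbrand Aquatic Center"),
    ("socialsciences", "Social Sciences"),
    ("sonora", "Sonora"),
    ("stewardobservatory", "Steward Observatory"),
    ("studentrecreationcenter", "Student Recreation Center"),
    ("northrec", "North REC"),
    ("honors", "Honors"),
    ("cactusgrill", "Cactus Grill"),
    ("85north", "85 North"),
    ("slotcanyoncaf\u00e9", "Slot Canyon Caf\u00e9"),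
    ("radicchio", "Radicchio"),
    ("studentunionmemorialcenter", "Student Union Memorial Center"),
    ("tyndallavegarage", "Tyndall Ave. Garage"),
    ("udallcenter", "Udall Center"),
    ("uamc", "UAMC"),
    ("vetsci&microbiology", "Vet. Sci. & Microbiology"),
    ("visitorcenter", "Visitor Center"),
    ("yavapai", "Yavapai"),
    ("yuma", "Yuma"),
    ("coleandjeanniedavissportscenter", "Cole and Jeannie Davis Sports Center")
]

set_option maxRecDepth 100000 in
set_option maxHeartbeats 4000000 in
theorem normed_eq :
    (ALIASES.map (fun p => (pyNorm p.1, p.2))) ++ CAMPUS_BUILDINGS.map (fun b => (pyNorm b, b))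
      = NORMED := by
  decide

-- Source B's table is the first-occurrence dedup of that concatenation
set_option maxRecDepth 100000 in
set_option maxHeartbeats 2000000 in
theorem dedup_eq : keyDedupAux [] NORMED = LOOKUP_TABLE := by
  decide

-- ===== VERDICT =====
theorem get_standard_name_spec : Claim_equal_get_standard_name := by
  intro name _
  unfold Spec_get_standard_name get_standard_name get_standard_name_alt
  rw [dict_get?_eq_lookup, ← dedup_eq,
      lookup_keyDedupAux (pyNorm name) [] NORMED (by simp), ← normed_eq, lookup_append,
      ← scanAliases_eq, ← scanBuildings_eq]
  cases h : scanAliases (pyNorm name) ALIASES <;> simp [h, Option.or]
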